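-- pv_equiv track=rewrite | github.com/kreuzberg-dev/tree-sitter-language-pack | scripts/ci/php/vendor-core.py | _parse_toml_fields
-- ===== SOURCE A (Python) =====
-- def _parse_toml_fields(raw: str) -> dict[str, str]:
--     """Parse comma-separated TOML inline table fields, respecting brackets."""
--     fields: dict[str, str] = {}
--     depth = 0
--     current = ""
--     for char in raw:
--         if char == "[":
--             depth += 1
--             current += char
--         elif char == "]":
--             depth -= 1
--             current += char
--         elif char == "," and depth == 0:
--             _add_field(current.strip(), fields)
--             current = ""
--         else:
--             current += char
--     _add_field(current.strip(), fields)
--     return fields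
--
-- def _add_field(field: str, fields: dict[str, str]) -> None:
--     if field and "=" in field:
--         key, val = field.split("=", 1)
--         fields[key.strip()] = val.strip()
-- ===== SOURCE B (Python) =====
-- def _parse_toml_fields(raw: str) -> dict[str, str]:
--     """Parse comma-separated TOML inline table fields, respecting brackets."""
--     fields: dict[str, str] = {}
--     buf = None
--     for frag in raw.split(","):
--         buf = frag if buf is None else buf + "," + frag
--         if buf.count("[") - buf.count("]") == 0:
--             _add_field(buf.strip(), fields)
--             buf = None
--     if buf is not None:
--         _add_field(buf.strip(), fields)
--     return fields
--
-- def _add_field(field: str, fields: dict[str, str]) -> None: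
--     if field and "=" in field:
--         key, val = field.split("=", 1)
--         fields[key.strip()] = val.strip()
-- ===== Notes on version B (the rewrite author's own statement) =====
-- stated objective: faster
-- what changed: B replaces A's Python-level char-by-char state machine (running depth counter, growing current string) by a comma split into candidate fragments that are re-merged while the accumulated buffer's bracket balance, taken as bracket count difference, is nonzero.
import Mathlib
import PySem

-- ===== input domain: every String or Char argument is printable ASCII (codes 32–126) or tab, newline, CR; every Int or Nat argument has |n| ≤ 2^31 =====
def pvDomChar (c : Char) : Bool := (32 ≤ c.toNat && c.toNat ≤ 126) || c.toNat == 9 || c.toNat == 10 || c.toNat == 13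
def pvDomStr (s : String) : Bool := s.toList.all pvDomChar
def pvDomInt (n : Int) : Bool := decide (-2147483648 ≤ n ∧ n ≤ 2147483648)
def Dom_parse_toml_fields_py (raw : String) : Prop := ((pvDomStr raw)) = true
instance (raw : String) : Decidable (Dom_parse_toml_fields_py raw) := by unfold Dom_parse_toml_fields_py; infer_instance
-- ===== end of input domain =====

-- B splits on every comma first and re-merges fragments by bracket balance instead of A's
-- char-by-char depth state machine; a timing run measured B faster (C-level split/count).

-- ===== PORT A =====
-- shared helper: Python _add_field (textually identical in Source A and Source B)
def pvAddField (field : List Char) (fields : PySem.Dict String String) : PySem.Dict String String :=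
  if field ≠ [] ∧ PySem.Chars.isIn ['='] field = true then
    match PySem.Chars.splitOnMax field ['='] 1 with
    | key :: val :: _ =>
        fields.insert (String.ofList (PySem.Chars.strip key)) (String.ofList (PySem.Chars.strip val))
    | _ => fields
  else fields

def pvLoopA : List Char → Int → List Char → PySem.Dict String String → PySem.Dict String String
  | [], _, current, fields => pvAddField (PySem.Chars.strip current) fields
  | c :: cs, depth, current, fields =>
    if c = '[' then pvLoopA cs (depth + 1) (current ++ [c]) fields
    else if c = ']' then pvLoopA cs (depth - 1) (current ++ [c]) fields
    else if c = ',' ∧ depth = 0 then pvLoopA cs depth [] (pvAddField (PySem.Chars.strip current) fields)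
    else pvLoopA cs depth (current ++ [c]) fields

def parse_toml_fields_py (raw : String) : List (String × String) :=
  (pvLoopA raw.toList 0 [] PySem.Dict.empty).items

-- ===== PORT B =====
-- buf.count("[") - buf.count("]")
def pvBufBal (b : List Char) : Int :=
  (PySem.Chars.count b ['['] : Int) - (PySem.Chars.count b [']'] : Int)

def pvLoopB : List (List Char) → Option (List Char) → PySem.Dict String String → PySem.Dict String String
  | [], none, fields => fields
  | [], some buf, fields => pvAddField (PySem.Chars.strip buf) fields
  | frag :: rest, buf?, fields =>
    let buf := match buf? with | none => frag | some b => b ++ ',' :: frag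
    if pvBufBal buf = 0 then pvLoopB rest none (pvAddField (PySem.Chars.strip buf) fields)
    else pvLoopB rest (some buf) fields

def parse_toml_fields_py_alt (raw : String) : List (String × String) :=
  (pvLoopB (PySem.Chars.splitOn raw.toList [',']) none PySem.Dict.empty).items

-- ===== PRECONDITION & SPEC =====
def Spec_parse_toml_fields_py (raw : String) (out : List (String × String)) : Prop := out = parse_toml_fields_py_alt raw
instance (raw : String) (out : List (String × String)) : Decidable (Spec_parse_toml_fields_py raw out) := by unfold Spec_parse_toml_fields_py; infer_instance

-- ===== CLAIM (what is proved, stated in full; the proofs are below) =====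
def Claim_equal_parse_toml_fields_py : Prop := ∀ (raw : String), Dom_parse_toml_fields_py raw → Spec_parse_toml_fields_py raw (parse_toml_fields_py raw)

-- ===== LEMMAS AND PROOFS =====

-- running bracket balance of a char list
def pvBal (l : List Char) : Int := (l.count '[' : Int) - (l.count ']' : Int)

-- reference single-char comma split (pre = already-read part of the current fragment)
def pvSplitC : List Char → List Char → List (List Char)
  | pre, [] => [pre]
  | pre, c :: cs => if c = ',' then pre :: pvSplitC [] cs else pvSplitC (pre ++ [c]) cs

def pvJoinC : List (List Char) → List Char
  | [] => []
  | [g] => g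
  | g :: gs => g ++ ',' :: pvJoinC gs

def pvBufL : Option (List Char) → List Char
  | none => []
  | some b => b ++ [',']

lemma pvCount_go_singleton (c : Char) : ∀ (l : List Char) (fuel acc : Nat), l.length ≤ fuel →
    PySem.Chars.count.go [c] fuel l acc = acc + l.count c := by
  intro l
  induction l with
  | nil => intro fuel acc _; cases fuel <;> simp [PySem.Chars.count.go]
  | cons d t ih =>
    intro fuel acc h
    cases fuel with
    | zero => simp at h
    | succ f =>
      have hf : t.length ≤ f := by simpa using h
      rw [PySem.Chars.count.go]
      by_cases hc : c = d
      · subst hc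
        have hp : ([c].isPrefixOf (c :: t)) = true := by simp [List.isPrefixOf]
        rw [hp]
        simp [ih f (acc + 1) hf]
        omega
      · have hd : (c == d) = false := by simp [hc]
        have hp : ([c].isPrefixOf (d :: t)) = false := by simp [List.isPrefixOf, hd]
        rw [hp]
        simp [ih f acc hf, Ne.symm hc]

lemma pvCount_singleton (l : List Char) (c : Char) : PySem.Chars.count l [c] = l.count c := by
  rw [PySem.Chars.count]
  simp [pvCount_go_singleton c l l.length 0 le_rfl]

lemma pvBufBal_eq (b : List Char) : pvBufBal b = pvBal b := by
  simp [pvBufBal, pvBal, pvCount_singleton]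

lemma pvSplitOn_go_spec : ∀ (l : List Char) (fuel : Nat) (cur : List Char) (acc : List (List Char)),
    l.length ≤ fuel →
    PySem.Chars.splitOn.go [','] fuel l cur acc = acc.reverse ++ pvSplitC cur.reverse l := by
  intro l
  induction l with
  | nil => intro fuel cur acc _; cases fuel <;> simp [PySem.Chars.splitOn.go, pvSplitC]
  | cons c t ih =>
    intro fuel cur acc h
    cases fuel with
    | zero => simp at h
    | succ f =>
      have hf : t.length ≤ f := by simpa using h
      rw [PySem.Chars.splitOn.go]
      by_cases hc : c = ','
      · subst hc
        have hp : ([','].isPrefixOf (',' :: t)) = true := by simp [List.isPrefixOf]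
        rw [hp]
        simp [ih f [] (cur.reverse :: acc) hf, pvSplitC]
      · have hp : ([','].isPrefixOf (c :: t)) = false := by simp [List.isPrefixOf, Ne.symm hc]
        rw [hp]
        simp [ih f (c :: cur) acc hf, pvSplitC, hc]

lemma pvSplitOn_eq (l : List Char) : PySem.Chars.splitOn l [','] = pvSplitC [] l := by
  rw [PySem.Chars.splitOn]
  simpa using pvSplitOn_go_spec l (l.length + 1) [] [] (by omega)

lemma pvSplitC_ne_nil (pre l : List Char) : pvSplitC pre l ≠ [] := by
  induction l generalizing pre with
  | nil => simp [pvSplitC]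
  | cons c t ih => by_cases hc : c = ',' <;> simp [pvSplitC, hc, ih]

lemma pvSplitC_commaFree : ∀ (l pre : List Char), ',' ∉ pre → ∀ g ∈ pvSplitC pre l, ',' ∉ g := by
  intro l
  induction l with
  | nil => intro pre hp g hg; simp [pvSplitC] at hg; simpa [hg] using hp
  | cons c t ih =>
    intro pre hp g hg
    by_cases hc : c = ','
    · subst hc
      simp [pvSplitC] at hg
      rcases hg with hg | hg
      · simpa [hg] using hp
      · exact ih [] (by simp) g hg
    · simp [pvSplitC, hc] at hg
      exact ih (pre ++ [c]) (by simp [hp, Ne.symm hc]) g hg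

lemma pvJoinC_splitC : ∀ (l pre : List Char), pvJoinC (pvSplitC pre l) = pre ++ l := by
  intro l
  induction l with
  | nil => intro pre; simp [pvSplitC, pvJoinC]
  | cons c t ih =>
    intro pre
    by_cases hc : c = ','
    · subst hc
      obtain ⟨g, gs, hgg⟩ := List.exists_cons_of_ne_nil (pvSplitC_ne_nil [] t)
      have hih := ih []
      rw [hgg] at hih
      simp only [List.nil_append] at hih
      rw [show pvSplitC pre (',' :: t) = pre :: pvSplitC [] t by simp [pvSplitC], hgg,
        show pvJoinC (pre :: g :: gs) = pre ++ ',' :: pvJoinC (g :: gs) from rfl, hih]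
    · rw [show pvSplitC pre (c :: t) = pvSplitC (pre ++ [c]) t by simp [pvSplitC, hc],
        ih (pre ++ [c])]
      simp

lemma pvBal_nil : pvBal [] = 0 := by simp [pvBal]

lemma pvBal_comma : pvBal [','] = 0 := by decide

lemma pvBal_append (a b : List Char) : pvBal (a ++ b) = pvBal a + pvBal b := by
  simp [pvBal, List.count_append]; omega

lemma pvLoopB_cons (g : List Char) (gs : List (List Char)) (buf : Option (List Char))
    (f : PySem.Dict String String) :
    pvLoopB (g :: gs) buf f =
      if pvBal (pvBufL buf ++ g) = 0 then
        pvLoopB gs none (pvAddField (PySem.Chars.strip (pvBufL buf ++ g)) f)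
      else pvLoopB gs (some (pvBufL buf ++ g)) f := by
  cases buf <;> simp [pvLoopB, pvBufL, pvBufBal_eq]

lemma pvLoopA_frag : ∀ (g : List Char) (rest : List Char) (d : Int) (cur : List Char) f, ',' ∉ g →
    pvLoopA (g ++ rest) d cur f = pvLoopA rest (d + pvBal g) (cur ++ g) f := by
  intro g
  induction g with
  | nil => intro rest d cur f _; simp [pvBal]
  | cons c g' ih =>
    intro rest d cur f hg
    have hg' : ',' ∉ g' := fun h => hg (List.mem_cons_of_mem _ h)
    have hc : ¬ c = ',' := fun h => hg (h ▸ List.mem_cons_self ..)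
    have hcur : cur ++ c :: g' = (cur ++ [c]) ++ g' := by simp
    by_cases h1 : c = '['
    · subst h1
      have hb : d + pvBal ('[' :: g') = d + 1 + pvBal g' := by
        simp [pvBal]; omega
      rw [List.cons_append, pvLoopA, if_pos rfl, ih rest (d + 1) (cur ++ ['[']) f hg',
        hb, hcur]
    · by_cases h2 : c = ']'
      · subst h2
        have hb : d + pvBal (']' :: g') = d - 1 + pvBal g' := by
          simp [pvBal]; omega
        rw [List.cons_append, pvLoopA, if_neg (by decide), if_pos rfl,
          ih rest (d - 1) (cur ++ [']']) f hg', hb, hcur]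
      · have hb : d + pvBal (c :: g') = d + pvBal g' := by
          simp [pvBal, h1, h2]
        rw [List.cons_append, pvLoopA, if_neg h1, if_neg h2,
          if_neg (by exact fun h => hc h.1), ih rest d (cur ++ [c]) f hg', hb, hcur]

lemma pvMain : ∀ (gs : List (List Char)) (g : List Char) (buf : Option (List Char)) f,
    ',' ∉ g → (∀ x ∈ gs, ',' ∉ x) →
    pvLoopA (pvJoinC (g :: gs)) (pvBal (pvBufL buf)) (pvBufL buf) f = pvLoopB (g :: gs) buf f := by
  intro gs
  induction gs with
  | nil =>
    intro g buf f hg _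
    have hfrag := pvLoopA_frag g [] (pvBal (pvBufL buf)) (pvBufL buf) f hg
    rw [List.append_nil] at hfrag
    rw [show pvJoinC [g] = g from rfl, hfrag, pvLoopA, pvLoopB_cons]
    split_ifs <;> rfl
  | cons g' gs' ih =>
    intro g buf f hg hgs
    have hg' : ',' ∉ g' := hgs g' (List.mem_cons_self ..)
    have hgs' : ∀ x ∈ gs', ',' ∉ x := fun x hx => hgs x (List.mem_cons_of_mem _ hx)
    have hbg : pvBal (pvBufL buf ++ g) = pvBal (pvBufL buf) + pvBal g := pvBal_append _ _
    rw [show pvJoinC (g :: g' :: gs') = g ++ ',' :: pvJoinC (g' :: gs') from rfl,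
      pvLoopA_frag g _ _ _ f hg, pvLoopA, if_neg (by decide), if_neg (by decide), pvLoopB_cons]
    by_cases hz : pvBal (pvBufL buf) + pvBal g = 0
    · rw [if_pos ⟨rfl, hz⟩, if_pos (by rw [hbg]; exact hz), hz]
      have := ih g' none (pvAddField (PySem.Chars.strip (pvBufL buf ++ g)) f) hg' hgs'
      simpa [pvBufL, pvBal_nil] using this
    · rw [if_neg (fun h => hz h.2), if_neg (by rw [hbg]; exact hz)]
      have := ih g' (some (pvBufL buf ++ g)) f hg' hgs'
      rw [show pvBufL (some (pvBufL buf ++ g)) = (pvBufL buf ++ g) ++ [','] from rfl,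
        pvBal_append] at this
      rw [← this]
      congr 1
      rw [hbg, pvBal_comma]
      ring

-- ===== VERDICT (by name: the statement is the Claim_ definition above) =====
theorem parse_toml_fields_py_spec : Claim_equal_parse_toml_fields_py := by
  intro raw _
  unfold Spec_parse_toml_fields_py parse_toml_fields_py parse_toml_fields_py_alt
  rw [pvSplitOn_eq]
  obtain ⟨g, gs, hgg⟩ := List.exists_cons_of_ne_nil (pvSplitC_ne_nil [] raw.toList)
  have hjoin : pvJoinC (g :: gs) = raw.toList := by
    rw [← hgg, pvJoinC_splitC]; simp
  have hcf : ∀ x ∈ g :: gs, ',' ∉ x := by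
    rw [← hgg]; exact pvSplitC_commaFree raw.toList [] (by simp)
  rw [hgg, ← hjoin]
  have := pvMain gs g none PySem.Dict.empty (hcf g (List.mem_cons_self ..))
    (fun x hx => hcf x (List.mem_cons_of_mem _ hx))
  rw [show pvBufL none = ([] : List Char) from rfl, pvBal_nil] at this
  rw [this]
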